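-- pv_equiv track=rewrite | github.com/paulklemstine/factor | lean/papers/photon_network_round2 (2).py | sum_four_sq_reps
-- ===== SOURCE A (Python) =====
-- import math
--
-- def sum_four_sq_reps(n):
--     """Find representations n = a² + b² + c² + d² with 0 ≤ a ≤ b ≤ c ≤ d."""
--     reps = []
--     for a in range(int(math.isqrt(n)) + 1):
--         for b in range(a, int(math.isqrt(n - a*a)) + 1):
--             for c in range(b, int(math.isqrt(n - a*a - b*b)) + 1):
--                 d_sq = n - a*a - b*b - c*c
--                 if d_sq < c*c:
--                     break
--                 d = int(math.isqrt(d_sq))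
--                 if d * d == d_sq and d >= c:
--                     reps.append((a, b, c, d))
--     return reps
-- ===== SOURCE B (Python) =====
-- import math
--
-- def sum_four_sq_reps(n):
--     """Find representations n = a² + b² + c² + d² with 0 ≤ a ≤ b ≤ c ≤ d."""
--     limit = int(math.isqrt(n))
--     table = {}
--     for c in range(limit + 1):
--         for d in range(c, int(math.isqrt(n - c*c)) + 1):
--             table.setdefault(c*c + d*d, []).append((c, d))
--     reps = []
--     for a in range(limit + 1):
--         for b in range(a, int(math.isqrt(n - a*a)) + 1):
--             r = n - a*a - b*b
--             for (c, d) in table.get(r, []):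
--                 if c >= b:
--                     reps.append((a, b, c, d))
--     return reps
-- ===== Notes on version B (the rewrite author's own statement) =====
-- stated objective: faster
-- what changed: B precomputes a dict mapping each two-square sum c*c+d*d (c<=d) to its (c,d) pairs in c-ascending order, then for each (a,b) looks up n-a*a-b*b and keeps pairs with c>=b, replacing A's innermost scanning loop by an index lookup.
import Mathlib
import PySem

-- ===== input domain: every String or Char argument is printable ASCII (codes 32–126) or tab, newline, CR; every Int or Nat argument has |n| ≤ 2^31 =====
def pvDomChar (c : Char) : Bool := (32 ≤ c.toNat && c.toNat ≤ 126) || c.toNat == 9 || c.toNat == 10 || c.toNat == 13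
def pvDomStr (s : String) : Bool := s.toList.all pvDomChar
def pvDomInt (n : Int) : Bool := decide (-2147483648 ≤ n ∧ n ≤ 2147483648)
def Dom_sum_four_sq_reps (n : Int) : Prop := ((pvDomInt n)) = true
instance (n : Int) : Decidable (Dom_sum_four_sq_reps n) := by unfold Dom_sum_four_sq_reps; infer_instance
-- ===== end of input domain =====

-- B replaces A's innermost scanning loop by a precomputed dict from each two-square sum
-- c*c+d*d to its (c,d) pairs (c ascending), looked up per (a,b); measured faster in a timing run.

-- math.isqrt, exact for the 0 ≤ n arguments admitted by Pre_ (every isqrt argument in both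
-- programs is then nonnegative).
def pvIsq (x : Int) : Int := (Nat.sqrt x.toNat : Int)

-- ===== PORT A =====
-- the innermost 'for c' loop with its 'break'
def pvLoopC (n a b : Int) : List Int → List (Int × Int × Int × Int) → List (Int × Int × Int × Int)
  | [], reps => reps
  | c :: cs, reps =>
    let dsq := n - a*a - b*b - c*c
    if dsq < c*c then reps
    else
      let d := pvIsq dsq
      if d * d = dsq ∧ d ≥ c then pvLoopC n a b cs (reps ++ [(a, b, c, d)])
      else pvLoopC n a b cs reps

def sum_four_sq_reps (n : Int) : List (Int × Int × Int × Int) :=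
  (PySem.List.pyRange 0 (pvIsq n + 1) 1).foldl (fun reps a =>
    (PySem.List.pyRange a (pvIsq (n - a*a) + 1) 1).foldl (fun reps b =>
      pvLoopC n a b (PySem.List.pyRange b (pvIsq (n - a*a - b*b) + 1) 1) reps) reps) []

-- ===== PORT B =====
def sum_four_sq_reps_alt (n : Int) : List (Int × Int × Int × Int) :=
  let limit := pvIsq n
  let table : PySem.Dict Int (List (Int × Int)) :=
    (PySem.List.pyRange 0 (limit + 1) 1).foldl (fun t c =>
      (PySem.List.pyRange c (pvIsq (n - c*c) + 1) 1).foldl (fun t d =>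
        t.modify (c*c + d*d) [] (· ++ [(c, d)])) t) PySem.Dict.empty
  (PySem.List.pyRange 0 (limit + 1) 1).foldl (fun reps a =>
    (PySem.List.pyRange a (pvIsq (n - a*a) + 1) 1).foldl (fun reps b =>
      (table.getD (n - a*a - b*b) []).foldl (fun reps cd =>
        if cd.1 ≥ b then reps ++ [(a, b, cd.1, cd.2)] else reps) reps) reps) []

-- ===== PRECONDITION & SPEC =====
-- Pre_ excludes n < 0, where Python's math.isqrt raises ValueError (in A and in B alike).
def Pre_sum_four_sq_reps (n : Int) : Prop := 0 ≤ n
instance (n : Int) : Decidable (Pre_sum_four_sq_reps n) := by unfold Pre_sum_four_sq_reps; infer_instance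
def pvWitness_sum_four_sq_reps : Int := 25

def Spec_sum_four_sq_reps (n : Int) (out : List (Int × Int × Int × Int)) : Prop := out = sum_four_sq_reps_alt n
instance (n : Int) (out : List (Int × Int × Int × Int)) : Decidable (Spec_sum_four_sq_reps n out) := by unfold Spec_sum_four_sq_reps; infer_instance

-- ===== CLAIM (what is proved, stated in full; the proofs are below) =====
def Claim_equal_sum_four_sq_reps : Prop := ∀ (n : Int), Dom_sum_four_sq_reps n → Pre_sum_four_sq_reps n → Spec_sum_four_sq_reps n (sum_four_sq_reps n)

-- ===== LEMMAS AND PROOFS =====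

-- the (c,d) pairs contributed for remainder r at a given c (at most one)
def pvAux (r c : Int) : List (Int × Int) :=
  if pvIsq (r - c*c) * pvIsq (r - c*c) = r - c*c ∧ c ≤ pvIsq (r - c*c) then [(c, pvIsq (r - c*c))] else []

lemma pvIsq_nonneg (x : Int) : 0 ≤ pvIsq x := Int.natCast_nonneg _

lemma pvLe_isq {c x : Int} (hc : 0 ≤ c) (h : c * c ≤ x) : c ≤ pvIsq x := by
  have hx : 0 ≤ x := le_trans (mul_self_nonneg c) h
  have h1 : c.toNat ^ 2 ≤ x.toNat := by
    have : ((c.toNat ^ 2 : Nat) : Int) ≤ ((x.toNat : Nat) : Int) := by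
      push_cast
      rw [Int.toNat_of_nonneg hc, Int.toNat_of_nonneg hx]
      nlinarith [h]
    exact_mod_cast this
  have h2 : c.toNat ≤ Nat.sqrt x.toNat := Nat.le_sqrt'.mpr h1
  have h3 : ((c.toNat : Nat) : Int) ≤ ((Nat.sqrt x.toNat : Nat) : Int) := by exact_mod_cast h2
  unfold pvIsq
  rw [Int.toNat_of_nonneg hc] at h3
  exact h3

lemma pvIsq_mono {x y : Int} (h : x ≤ y) : pvIsq x ≤ pvIsq y := by
  have := Nat.sqrt_le_sqrt (Int.toNat_le_toNat h)
  unfold pvIsq; exact_mod_cast this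

lemma pvIsq_sq {d : Int} (hd : 0 ≤ d) : pvIsq (d * d) = d := by
  have h1 : (d * d).toNat = d.toNat ^ 2 := by
    have : d * d = (d.toNat : Int) * (d.toNat : Int) := by rw [Int.toNat_of_nonneg hd]
    rw [this, ← Nat.cast_mul, Int.toNat_natCast, pow_two]
  have h2 : Nat.sqrt (d.toNat ^ 2) = d.toNat := Nat.sqrt_eq' d.toNat
  simp [pvIsq, h1, h2, Int.toNat_of_nonneg hd]

lemma pvSq_gt {r c : Int} (hc : 0 ≤ c) (h : pvIsq r + 1 ≤ c) : r < c * c := by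
  by_cases hr : 0 ≤ r
  · have h0 : r.toNat < (Nat.sqrt r.toNat + 1) ^ 2 := Nat.lt_succ_sqrt' r.toNat
    have h0' : ((r.toNat : Nat) : Int) < (((Nat.sqrt r.toNat + 1) ^ 2 : Nat) : Int) := by exact_mod_cast h0
    have hr' : ((r.toNat : Nat) : Int) = r := Int.toNat_of_nonneg hr
    unfold pvIsq at h
    push_cast at h0'
    nlinarith [h0', hr', h, hc]
  · push Not at hr; nlinarith [mul_self_nonneg c]

lemma pvAux_nil {r c : Int} (h : r < c * c) : pvAux r c = [] := by
  unfold pvAux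
  split
  · next hcond => exfalso; nlinarith [mul_self_nonneg (pvIsq (r - c*c)), hcond.1]
  · rfl

lemma pvAux_nil2 {r c : Int} (hc : 0 ≤ c) (h : r - c * c < c * c) : pvAux r c = [] := by
  unfold pvAux
  split
  · next hcond =>
    exfalso
    have hd : c ≤ pvIsq (r - c*c) := hcond.2
    nlinarith [hcond.1, mul_le_mul hd hd hc (le_trans hc hd)]
  · rfl

lemma pvFlatMap_congr {α β : Type} {l : List α} {f g : α → List β}
    (h : ∀ x ∈ l, f x = g x) : l.flatMap f = l.flatMap g := by
  induction l with
  | nil => rfl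
  | cons x xs ih =>
    simp only [List.flatMap_cons]
    rw [h x (by simp), ih (fun y hy => h y (List.mem_cons_of_mem _ hy))]

lemma pvLoopC_eq (n a b : Int) (l : List Int) (acc : List (Int × Int × Int × Int))
    (hpos : ∀ c ∈ l, 0 ≤ c) (hmono : l.Pairwise (· ≤ ·)) :
    pvLoopC n a b l acc
      = acc ++ (l.flatMap (pvAux (n - a*a - b*b))).map (fun cd => (a, b, cd.1, cd.2)) := by
  induction l generalizing acc with
  | nil => simp [pvLoopC]
  | cons c cs ih =>
    have hc : 0 ≤ c := hpos c (by simp)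
    have hall : ∀ x ∈ cs, c ≤ x := (List.pairwise_cons.mp hmono).1
    have hpos' : ∀ x ∈ cs, 0 ≤ x := fun x hx => hpos x (List.mem_cons_of_mem _ hx)
    have hmono' := (List.pairwise_cons.mp hmono).2
    by_cases hbr : n - a*a - b*b - c*c < c*c
    · have hnil : ∀ x ∈ c :: cs, pvAux (n - a*a - b*b) x = [] := by
        intro x hx
        have hx0 : 0 ≤ x := hpos x hx
        have hcx : c ≤ x := by
          rcases List.mem_cons.mp hx with rfl | hx'
          · exact le_refl x
          · exact hall x hx'
        exact pvAux_nil2 hx0 (by nlinarith)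
      rw [List.flatMap_eq_nil_iff.mpr hnil]
      simp [pvLoopC, if_pos hbr]
    · by_cases hcond : pvIsq (n - a*a - b*b - c*c) * pvIsq (n - a*a - b*b - c*c)
          = n - a*a - b*b - c*c ∧ pvIsq (n - a*a - b*b - c*c) ≥ c
      · have hstep : pvLoopC n a b (c :: cs) acc
            = pvLoopC n a b cs (acc ++ [(a, b, c, pvIsq (n - a*a - b*b - c*c))]) := by
          simp only [pvLoopC]
          rw [if_neg hbr, if_pos hcond]
        have haux : pvAux (n - a*a - b*b) c = [(c, pvIsq (n - a*a - b*b - c*c))] := by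
          unfold pvAux
          rw [if_pos]
          constructor
          · exact hcond.1
          · exact hcond.2
        rw [hstep, ih _ hpos' hmono']
        simp [haux, List.append_assoc]
      · have hstep : pvLoopC n a b (c :: cs) acc = pvLoopC n a b cs acc := by
          simp only [pvLoopC]
          rw [if_neg hbr, if_neg hcond]
        have haux : pvAux (n - a*a - b*b) c = [] := by
          unfold pvAux
          rw [if_neg]
          exact fun h => hcond ⟨h.1, h.2⟩
        rw [hstep, ih _ hpos' hmono']
        simp [haux]

-- ((pyRange c …).map pairs).filter (key == r), projected to the pair, is pvAux r c
-- filtering a unit-step range for one value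
lemma pvFilter_beq (lo hi v : Int) :
    (PySem.List.pyRange lo hi 1).filter (fun d => d == v)
      = if lo ≤ v ∧ v < hi then [v] else [] := by
  induction hk : (hi - lo).toNat generalizing lo with
  | zero =>
    have h : hi ≤ lo := by omega
    rw [PySem.List.pyRange_one_eq_nil h]
    simp only [List.filter_nil]
    rw [if_neg (by omega)]
  | succ k ih =>
    have h : lo < hi := by omega
    rw [PySem.List.pyRange_one_cons h, List.filter_cons]
    by_cases hv : lo = v
    · subst hv
      rw [ih (lo + 1) (by omega)]
      have h1 : ¬ (lo + 1 ≤ lo ∧ lo < hi) := by omega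
      have h2 : lo ≤ lo ∧ lo < hi := ⟨le_refl lo, h⟩
      rw [if_neg h1, if_pos h2, if_pos (by simp)]
    · have hb : ¬ ((lo == v) = true) := by simp [hv]
      rw [if_neg hb, ih (lo + 1) (by omega)]
      by_cases hiv : lo + 1 ≤ v ∧ v < hi
      · rw [if_pos hiv, if_pos (by omega)]
      · rw [if_neg hiv, if_neg (by omega)]

lemma pvFilter_key (n r c : Int) (hc : 0 ≤ c) (hr : r ≤ n) :
    (((PySem.List.pyRange c (pvIsq (n - c*c) + 1) 1).map
        (fun d => (c*c + d*d, (c, d)))).filter (fun p => p.1 == r)).map (·.2)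
      = pvAux r c := by
  rw [List.filter_map]
  by_cases hsq : pvIsq (r - c*c) * pvIsq (r - c*c) = r - c*c
  · have hcong : ∀ d ∈ PySem.List.pyRange c (pvIsq (n - c*c) + 1) 1,
        (((fun p => p.1 == r) ∘ (fun d => ((c*c + d*d : Int), (c, d)))) d) = (d == pvIsq (r - c*c)) := by
      intro d hd
      have hd' := (PySem.List.mem_pyRange_one).mp hd
      have hd0 : 0 ≤ d := le_trans hc hd'.1
      simp only [Function.comp]
      have : (c*c + d*d = r) ↔ (d = pvIsq (r - c*c)) := by
        constructor
        · intro h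
          have hdd : d * d = r - c*c := by omega
          rw [← hdd, pvIsq_sq hd0]
        · intro h
          subst h
          omega
      by_cases hcase : c*c + d*d = r
      · have h2 := this.mp hcase
        simp [h2]
        omega
      · have : ¬ (d = pvIsq (r - c*c)) := fun h => hcase (this.mpr h)
        simp [hcase, this]
    rw [List.filter_congr hcong, pvFilter_beq]
    by_cases hcd : c ≤ pvIsq (r - c*c)
    · have hub : pvIsq (r - c*c) ≤ pvIsq (n - c*c) := by
        apply pvLe_isq (pvIsq_nonneg _)
        rw [hsq]
        omega
      rw [if_pos ⟨hcd, by omega⟩]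
      unfold pvAux
      rw [if_pos ⟨hsq, hcd⟩]
      rfl
    · rw [if_neg (by intro h; exact hcd h.1)]
      unfold pvAux
      rw [if_neg (by intro h; exact hcd h.2)]
      rfl
  · have hnone : ∀ d ∈ PySem.List.pyRange c (pvIsq (n - c*c) + 1) 1,
        ¬ ((((fun p => p.1 == r) ∘ (fun d => ((c*c + d*d : Int), (c, d)))) d) = true) := by
      intro d hd
      have hd' := (PySem.List.mem_pyRange_one).mp hd
      have hd0 : 0 ≤ d := le_trans hc hd'.1
      simp only [Function.comp, beq_iff_eq]
      intro h
      apply hsq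
      have hdd : d * d = r - c*c := by omega
      rw [← hdd, pvIsq_sq hd0, hdd]
    rw [List.filter_eq_nil_iff.mpr hnone]
    unfold pvAux
    rw [if_neg (by intro h; exact hsq h.1)]
    rfl

lemma pvTable_getD (n r : Int) :
    ((PySem.List.pyRange 0 (pvIsq n + 1) 1).foldl (fun t c =>
        (PySem.List.pyRange c (pvIsq (n - c*c) + 1) 1).foldl (fun t d =>
          t.modify (c*c + d*d) [] (· ++ [(c, d)])) t) PySem.Dict.empty).getD r []
      = (((PySem.List.pyRange 0 (pvIsq n + 1) 1).flatMap (fun c =>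
          (PySem.List.pyRange c (pvIsq (n - c*c) + 1) 1).map
            (fun d => (c*c + d*d, (c, d))))).filter (fun p => p.1 == r)).map (·.2) := by
  have h2 : (PySem.List.pyRange 0 (pvIsq n + 1) 1).foldl (fun t c =>
        (PySem.List.pyRange c (pvIsq (n - c*c) + 1) 1).foldl (fun t d =>
          t.modify (c*c + d*d) [] (· ++ [(c, d)])) t) PySem.Dict.empty
      = ((PySem.List.pyRange 0 (pvIsq n + 1) 1).flatMap (fun c =>
          (PySem.List.pyRange c (pvIsq (n - c*c) + 1) 1).map
            (fun d => (c*c + d*d, (c, d))))).foldl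
          (fun t p => t.modify p.1 [] (· ++ [p.2])) PySem.Dict.empty := by
    rw [List.foldl_flatMap]
    apply PySem.List.foldl_congr_mem
    intro t c _
    rw [List.foldl_map]
  rw [h2, PySem.Dict.getD_foldl_modify_append]
  simp

lemma pvRange_bridge (n r b : Int) (hb : 0 ≤ b) (hb2 : b ≤ pvIsq n + 1) (hrn : r ≤ n) :
    (PySem.List.pyRange 0 (pvIsq n + 1) 1).flatMap
        (fun c => if b ≤ c then pvAux r c else [])
      = (PySem.List.pyRange b (pvIsq r + 1) 1).flatMap (pvAux r) := by
  rw [PySem.List.pyRange_one_append 0 b (pvIsq n + 1) hb hb2, List.flatMap_append]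
  have h1 : (PySem.List.pyRange 0 b 1).flatMap (fun c => if b ≤ c then pvAux r c else []) = [] := by
    apply List.flatMap_eq_nil_iff.mpr
    intro c hcm
    have := (PySem.List.mem_pyRange_one).mp hcm
    rw [if_neg (by omega)]
  rw [h1, List.nil_append]
  have hguard : (PySem.List.pyRange b (pvIsq n + 1) 1).flatMap
        (fun c => if b ≤ c then pvAux r c else [])
      = (PySem.List.pyRange b (pvIsq n + 1) 1).flatMap (pvAux r) := by
    apply pvFlatMap_congr
    intro c hcm
    have := (PySem.List.mem_pyRange_one).mp hcm
    rw [if_pos this.1]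
  rw [hguard]
  by_cases hcase : b ≤ pvIsq r + 1
  · have hrs : pvIsq r + 1 ≤ pvIsq n + 1 := by
      have := pvIsq_mono hrn
      omega
    rw [PySem.List.pyRange_one_append b (pvIsq r + 1) (pvIsq n + 1) hcase hrs, List.flatMap_append]
    have h2 : (PySem.List.pyRange (pvIsq r + 1) (pvIsq n + 1) 1).flatMap (pvAux r) = [] := by
      apply List.flatMap_eq_nil_iff.mpr
      intro c hcm
      have hcm' := (PySem.List.mem_pyRange_one).mp hcm
      have hc0 : 0 ≤ c := le_trans (by have := pvIsq_nonneg r; omega) hcm'.1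
      exact pvAux_nil (pvSq_gt hc0 hcm'.1)
    rw [h2, List.append_nil]
  · rw [PySem.List.pyRange_one_eq_nil (show pvIsq r + 1 ≤ b by omega)]
    apply List.flatMap_eq_nil_iff.mpr
    intro c hcm
    have hcm' := (PySem.List.mem_pyRange_one).mp hcm
    have hc0 : 0 ≤ c := le_trans hb hcm'.1
    exact pvAux_nil (pvSq_gt hc0 (by omega))

lemma pvFoldl_guard (a b : Int) (l : List (Int × Int)) (acc : List (Int × Int × Int × Int)) :
    l.foldl (fun reps cd => if cd.1 ≥ b then reps ++ [(a, b, cd.1, cd.2)] else reps) acc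
      = acc ++ (l.filter (fun cd => decide (cd.1 ≥ b))).map (fun cd => (a, b, cd.1, cd.2)) := by
  induction l generalizing acc with
  | nil => simp
  | cons x xs ih =>
    simp only [List.foldl_cons, List.filter_cons]
    by_cases h : x.1 ≥ b
    · rw [if_pos h, ih]
      simp [h]
    · rw [if_neg h, ih]
      simp [h]

lemma pvAux_guard (r b c : Int) :
    (pvAux r c).filter (fun cd => decide (cd.1 ≥ b)) = if b ≤ c then pvAux r c else [] := by
  unfold pvAux
  split
  · by_cases hbc : b ≤ c <;> simp [hbc]
  · simp

-- ===== VERDICT (by name: the statement is the Claim_ definition above) =====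
theorem sum_four_sq_reps_spec : Claim_equal_sum_four_sq_reps := by
  intro n _ hn
  unfold Spec_sum_four_sq_reps
  simp only [sum_four_sq_reps, sum_four_sq_reps_alt]
  apply PySem.List.foldl_congr_mem
  intro acc a ha
  apply PySem.List.foldl_congr_mem
  intro acc2 b hb
  have ha' := (PySem.List.mem_pyRange_one).mp ha
  have hb' := (PySem.List.mem_pyRange_one).mp hb
  have ha0 : 0 ≤ a := ha'.1
  have hb0 : 0 ≤ b := le_trans ha0 hb'.1
  have hbn : b ≤ pvIsq n + 1 := by
    have h1 : pvIsq (n - a*a) ≤ pvIsq n := pvIsq_mono (by nlinarith)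
    omega
  have hrn : n - a*a - b*b ≤ n := by nlinarith
  rw [pvLoopC_eq n a b _ acc2
      (fun c hc => le_trans hb0 ((PySem.List.mem_pyRange_one).mp hc).1)
      ((PySem.List.pairwise_lt_pyRange_one ..).imp le_of_lt)]
  rw [pvFoldl_guard a b]
  conv_rhs => rw [pvTable_getD n (n - a*a - b*b), List.filter_flatMap, List.map_flatMap]
  rw [pvFlatMap_congr (fun c hc =>
    pvFilter_key n (n - a*a - b*b) c ((PySem.List.mem_pyRange_one).mp hc).1 hrn)]
  conv_rhs => rw [List.filter_flatMap]
  rw [pvFlatMap_congr (fun c _ => pvAux_guard (n - a*a - b*b) b c)]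
  rw [pvRange_bridge n (n - a*a - b*b) b hb0 hbn hrn]
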